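-- pv_equiv track=rewrite | github.com/s-bear/UVTV | PCB/expand_netlist.py | outer_join
-- ===== SOURCE A (Python) =====
-- def outer_join(lists, delim='', prefix='',suffix=''):
--     """join a list of lists of strings in an outer-product fashion"""
--     strings = []
--     if len(lists) > 1:
--         for s in lists[0]:
--             strings.extend(outer_join(lists[1:], delim, prefix+s+delim, suffix))
--     else:
--         for s in lists[0]:
--             strings.append(prefix + s + suffix)
--     return strings
-- ===== SOURCE B (Python) =====
-- def outer_join(lists, delim='', prefix='', suffix=''):
--     """join a list of lists of strings in an outer-product fashion"""
--     combos = [[]]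
--     for lst in lists:
--         combos = [c + [s] for c in combos for s in lst]
--     return [prefix + delim.join(c) + suffix for c in combos]
-- ===== Notes on version B (the rewrite author's own statement) =====
-- stated objective: idiomatic
-- what changed: Replaces A's slicing recursion (which rebuilds lists[1:] and re-threads the growing prefix through each call) with an iterative Cartesian-product accumulator followed by a single delim.join comprehension.
-- outside the precondition, e.g. on outer_join([], '', '', ''): A raises IndexError, B returns ['']
import Mathlib
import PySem

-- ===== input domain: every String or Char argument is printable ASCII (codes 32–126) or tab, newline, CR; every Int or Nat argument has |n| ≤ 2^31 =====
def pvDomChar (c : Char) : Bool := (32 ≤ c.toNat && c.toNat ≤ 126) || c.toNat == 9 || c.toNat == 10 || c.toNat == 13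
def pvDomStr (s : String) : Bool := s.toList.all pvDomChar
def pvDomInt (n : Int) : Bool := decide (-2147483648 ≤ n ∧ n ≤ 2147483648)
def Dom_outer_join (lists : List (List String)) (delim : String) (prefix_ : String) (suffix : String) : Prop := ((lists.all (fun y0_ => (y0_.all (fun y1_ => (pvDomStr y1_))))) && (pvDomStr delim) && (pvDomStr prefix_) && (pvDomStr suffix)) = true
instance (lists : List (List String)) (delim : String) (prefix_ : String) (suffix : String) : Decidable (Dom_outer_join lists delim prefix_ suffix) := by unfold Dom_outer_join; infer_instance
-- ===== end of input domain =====

-- B replaces A's slicing recursion by an iterative Cartesian-product accumulator plus one join-comprehension (idiomatic, same cost).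


-- ===== PORT A =====
-- A recurses on the list of lists; the [] case is unreachable under Pre_ (Python raises IndexError there).
def outer_join (lists : List (List String)) (delim : String) (prefix_ : String) (suffix : String) : List String :=
  match lists with
  | [] => []
  | [l] => l.foldl (fun acc s => acc ++ [prefix_ ++ s ++ suffix]) []
  | l :: rest =>
    l.foldl (fun acc s => acc ++ outer_join rest delim (prefix_ ++ s ++ delim) suffix) []

-- ===== PORT B =====
def outer_join_alt (lists : List (List String)) (delim : String) (prefix_ : String) (suffix : String) : List String :=
  (lists.foldl (fun combos lst => combos.flatMap (fun c => lst.map (fun s => c ++ [s]))) [[]]).map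
    (fun c => prefix_ ++ PySem.Str.join delim c ++ suffix)

-- ===== PRECONDITION & SPEC =====
-- Pre_ excludes only lists == [], where Python A raises IndexError at lists[0].
def Pre_outer_join (lists : List (List String)) (delim : String) (prefix_ : String) (suffix : String) : Prop := lists ≠ []
instance (lists : List (List String)) (delim : String) (prefix_ : String) (suffix : String) : Decidable (Pre_outer_join lists delim prefix_ suffix) := by unfold Pre_outer_join; infer_instance
def pvWitness_outer_join : List (List String) × String × String × String := ([["a", "b"], ["c"]], "-", "p", "s")

def Spec_outer_join (lists : List (List String)) (delim : String) (prefix_ : String) (suffix : String) (out : List String) : Prop := out = outer_join_alt lists delim prefix_ suffix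
instance (lists : List (List String)) (delim : String) (prefix_ : String) (suffix : String) (out : List String) : Decidable (Spec_outer_join lists delim prefix_ suffix out) := by unfold Spec_outer_join; infer_instance

-- ===== CLAIM (what is proved, stated in full; the proofs are below) =====
def Claim_equal_outer_join : Prop := ∀ (lists : List (List String)) (delim : String) (prefix_ : String) (suffix : String), Dom_outer_join lists delim prefix_ suffix → Pre_outer_join lists delim prefix_ suffix → Spec_outer_join lists delim prefix_ suffix (outer_join lists delim prefix_ suffix)

-- ===== LEMMAS AND PROOFS =====

lemma str_join_singleton (delim s : String) : PySem.Str.join delim [s] = s := by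
  rw [← String.toList_inj]
  simp [PySem.Str.join, PySem.Chars.join_singleton]

lemma flatMap_single {α β : Type} (f : α → β) : ∀ l : List α, l.flatMap (fun x => [f x]) = l.map f
  | [] => rfl
  | a :: t => by simp [flatMap_single f t]

lemma str_join_cons_cons (delim p q : String) (rest : List String) :
    PySem.Str.join delim (p :: q :: rest) = p ++ delim ++ PySem.Str.join delim (q :: rest) := by
  rw [← String.toList_inj]
  simp [PySem.Str.join, PySem.Chars.join_cons_cons]

-- right-nested product of the lists (leftmost varies slowest), used to characterise both ports
def prodR : List (List String) → List (List String)
  | [] => [[]]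
  | l :: rest => l.flatMap (fun s => (prodR rest).map (fun c => s :: c))

lemma prodR_length_mem : ∀ (lists : List (List String)) (c : List String), c ∈ prodR lists → c.length = lists.length := by
  intro lists
  induction lists with
  | nil => intro c hc; simp [prodR] at hc; simp [hc]
  | cons l rest ih =>
    intro c hc
    simp [prodR] at hc
    obtain ⟨s, _, c', hc', rfl⟩ := hc
    simp [ih c' hc']

lemma alt_foldl (lists : List (List String)) :
    ∀ (combos : List (List String)),
      lists.foldl (fun combos lst => combos.flatMap (fun c => lst.map (fun s => c ++ [s]))) combos
        = combos.flatMap (fun c => (prodR lists).map (fun c' => c ++ c')) := by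
  induction lists with
  | nil => intro combos; simp [prodR]
  | cons l rest ih =>
    intro combos
    simp only [List.foldl_cons, ih, prodR]
    simp [List.flatMap_map, List.map_flatMap, List.flatMap_assoc, Function.comp_def]

lemma alt_eq (lists : List (List String)) (delim prefix_ suffix : String) :
    outer_join_alt lists delim prefix_ suffix
      = (prodR lists).map (fun c => prefix_ ++ PySem.Str.join delim c ++ suffix) := by
  simp [outer_join_alt, alt_foldl]

lemma a_eq (lists : List (List String)) (h : lists ≠ []) :
    ∀ (delim prefix_ suffix : String),
      outer_join lists delim prefix_ suffix
        = (prodR lists).map (fun c => prefix_ ++ PySem.Str.join delim c ++ suffix) := by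
  induction lists with
  | nil => exact absurd rfl h
  | cons l rest ih =>
    intro delim prefix_ suffix
    match rest with
    | [] =>
      simp only [outer_join, prodR]
      rw [PySem.List.foldl_append_eq_flatMap (fun s => [prefix_ ++ s ++ suffix])]
      simp only [List.nil_append, List.map_singleton]
      rw [flatMap_single (fun s => prefix_ ++ s ++ suffix) l,
        flatMap_single (fun s => ([s] : List String)) l, List.map_map]
      exact List.map_congr_left (fun s _ => by simp [Function.comp_def, str_join_singleton])
    | r :: rs =>
      show (l.foldl (fun acc s => acc ++ outer_join (r::rs) delim (prefix_ ++ s ++ delim) suffix) []) = _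
      rw [PySem.List.foldl_append_eq_flatMap
        (fun s => outer_join (r::rs) delim (prefix_ ++ s ++ delim) suffix)]
      simp only [List.nil_append]
      have hrest := ih (by simp)
      rw [show prodR (l :: r :: rs) = l.flatMap (fun s => (prodR (r :: rs)).map (fun c => s :: c)) from rfl]
      simp only [List.map_flatMap, List.map_map]
      refine List.flatMap_congr ?_ ; intro s _
      rw [hrest delim (prefix_ ++ s ++ delim) suffix]
      refine List.map_congr_left ?_
      intro c hc
      have hlen : c.length = (r :: rs).length := prodR_length_mem _ c hc
      match c with
      | [] => simp at hlen
      | x :: xs =>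
        -- join delim (s :: x :: xs) = s ++ delim ++ join delim (x :: xs), at the string level
        simp only [Function.comp_def, str_join_cons_cons]
        simp [String.append_assoc]

-- ===== VERDICT (by name: the statement is the Claim_ definition above) =====
theorem outer_join_spec : Claim_equal_outer_join := by
  intro lists delim prefix_ suffix _ hpre
  unfold Spec_outer_join
  rw [a_eq lists hpre, alt_eq]
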